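-- pv_equiv track=rewrite | github.com/aviswerdlow/k4 | experiments/p74/scripts/p74_nulls_working.py | tokenize_v2
-- ===== SOURCE A (Python) =====
-- def tokenize_v2(text, canonical_cuts, head_end=None):
--     """Enhanced tokenization using canonical cuts - CORRECTED VERSION"""
--     if head_end:
--         text = text[:head_end]
--
--     # Use canonical cuts as token boundaries
--     cut_set = set(canonical_cuts)
--     tokens = []
--     current_token = ""
--
--     for i, char in enumerate(text):
--         if i in cut_set and current_token:
--             # At a cut position - finalize current token
--             if current_token.strip() and current_token.strip().isalpha():
--                 tokens.append(current_token.strip().upper())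
--             current_token = ""
--
--         if char.isalpha():
--             current_token += char
--         elif current_token:
--             # Non-alphabetic - end current token
--             if current_token.strip() and current_token.strip().isalpha():
--                 tokens.append(current_token.strip().upper())
--             current_token = ""
--
--     # Add final token
--     if current_token.strip() and current_token.strip().isalpha():
--         tokens.append(current_token.strip().upper())
--
--     return tokens
-- ===== SOURCE B (Python) =====
-- def tokenize_v2(text, canonical_cuts, head_end=None):
--     """Tokenize via delimiter-normalization: insert a space at each cut and for
--     each non-alpha char, then split and uppercase."""
--     if head_end:
--         text = text[:head_end]
--     cut_set = set(canonical_cuts)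
--     norm = ''.join(
--         (' ' if i in cut_set else '') + (ch if ch.isalpha() else ' ')
--         for i, ch in enumerate(text)
--     )
--     return [tok.upper() for tok in norm.split()]
-- ===== Notes on version B (the rewrite author's own statement) =====
-- stated objective: idiomatic
-- what changed: A's running-token state machine (mutable current_token with three duplicated flush sites) is replaced by building one space-normalized string in a single pass (space at each cut index and for each non-alpha char) and then using str.split() plus a list comprehension to produce the uppercased tokens.
import Mathlib
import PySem

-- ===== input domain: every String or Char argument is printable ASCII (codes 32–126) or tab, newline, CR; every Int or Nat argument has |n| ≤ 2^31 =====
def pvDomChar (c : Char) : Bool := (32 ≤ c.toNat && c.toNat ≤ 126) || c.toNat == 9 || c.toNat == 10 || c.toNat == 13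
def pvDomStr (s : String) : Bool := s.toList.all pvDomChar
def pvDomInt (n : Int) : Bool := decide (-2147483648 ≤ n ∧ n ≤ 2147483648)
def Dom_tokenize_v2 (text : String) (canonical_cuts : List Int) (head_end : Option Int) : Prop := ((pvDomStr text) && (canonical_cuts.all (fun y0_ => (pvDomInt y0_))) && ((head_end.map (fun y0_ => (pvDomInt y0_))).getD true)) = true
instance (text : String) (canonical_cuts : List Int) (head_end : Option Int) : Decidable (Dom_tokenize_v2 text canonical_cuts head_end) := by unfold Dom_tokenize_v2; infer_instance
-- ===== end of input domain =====

-- B replaces A's running-token state machine by normalize-to-spaces + split() + upper (more idiomatic, same cost).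

-- shared first line of both Pythons: `if head_end: text = text[:head_end]` (truthiness: None and 0 leave text unchanged)
def pvHead (text : String) (head_end : Option Int) : List Char :=
  match head_end with
  | some h => if h ≠ 0 then PySem.List.slice text.toList none (some h) else text.toList
  | none => text.toList

-- ===== PORT A =====
-- A's thrice-repeated flush: `if current_token.strip() and current_token.strip().isalpha(): tokens.append(current_token.strip().upper())`
def pvFlushA (tokens : List String) (cur : List Char) : List String :=
  if !(PySem.Chars.strip cur).isEmpty && PySem.Chars.strIsalpha (PySem.Chars.strip cur) then
    tokens ++ [String.ofList (PySem.Chars.upper (PySem.Chars.strip cur))]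
  else tokens

-- one iteration of A's `for i, char in enumerate(text)` body; state = (tokens, current_token)
def pvStepA (cs : PySem.Set Int) (st : List String × List Char) (p : Int × Char) : List String × List Char :=
  let st1 := if PySem.Set.contains cs p.1 && !st.2.isEmpty then (pvFlushA st.1 st.2, ([] : List Char)) else st
  if PySem.Chars.isalpha p.2 then (st1.1, st1.2 ++ [p.2])
  else if !st1.2.isEmpty then (pvFlushA st1.1 st1.2, ([] : List Char)) else st1

def tokenize_v2 (text : String) (canonical_cuts : List Int) (head_end : Option Int) : List String :=
  let cs := PySem.Set.ofList canonical_cuts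
  let st := (PySem.List.enumerate (pvHead text head_end) 0).foldl (pvStepA cs) ([], [])
  pvFlushA st.1 st.2

-- ===== PORT B =====
-- B's per-character contribution to the normalized string
def pvNormPair (cs : PySem.Set Int) (p : Int × Char) : List Char :=
  (if PySem.Set.contains cs p.1 then [' '] else []) ++ (if PySem.Chars.isalpha p.2 then [p.2] else [' '])

def tokenize_v2_alt (text : String) (canonical_cuts : List Int) (head_end : Option Int) : List String :=
  let cs := PySem.Set.ofList canonical_cuts
  let norm := PySem.Chars.join [] ((PySem.List.enumerate (pvHead text head_end) 0).map (pvNormPair cs))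
  (PySem.Chars.split₀ norm).map (fun tok => String.ofList (PySem.Chars.upper tok))

-- ===== PRECONDITION & SPEC =====
def Spec_tokenize_v2 (text : String) (canonical_cuts : List Int) (head_end : Option Int) (out : List String) : Prop := out = tokenize_v2_alt text canonical_cuts head_end
instance (text : String) (canonical_cuts : List Int) (head_end : Option Int) (out : List String) : Decidable (Spec_tokenize_v2 text canonical_cuts head_end out) := by unfold Spec_tokenize_v2; infer_instance

-- ===== CLAIM (what is proved, stated in full; the proofs are below) =====
def Claim_equal_tokenize_v2 : Prop := ∀ (text : String) (canonical_cuts : List Int) (head_end : Option Int), Dom_tokenize_v2 text canonical_cuts head_end → Spec_tokenize_v2 text canonical_cuts head_end (tokenize_v2 text canonical_cuts head_end)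

-- ===== LEMMAS AND PROOFS =====

lemma alpha_not_space (c : Char) (h : PySem.Chars.isalpha c = true) : PySem.Chars.isspace c = false := by
  have h' : (65 ≤ c.toNat ∧ c.toNat ≤ 90) ∨ (97 ≤ c.toNat ∧ c.toNat ≤ 122) := by
    simp only [PySem.Chars.isalpha, PySem.Chars.isupper, PySem.Chars.islower, Char.le_def,
      UInt32.le_iff_toNat_le, Bool.or_eq_true, Bool.and_eq_true, decide_eq_true_eq] at h
    exact h
  simp only [PySem.Chars.isspace]
  simp only [Bool.or_eq_false_iff, Bool.and_eq_false_iff, decide_eq_false_iff_not]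
  omega

lemma join_nil_map_cons (x : List Char) (xs : List (List Char)) :
    PySem.Chars.join [] (x :: xs) = x ++ PySem.Chars.join [] xs := by
  cases xs <;> simp [PySem.Chars.join, List.intercalate]

-- definitional equations of split₀.go
lemma splitgo_nil (cur : List Char) (acc : List (List Char)) :
    PySem.Chars.split₀.go [] cur acc =
      if cur.isEmpty then acc.reverse else (cur.reverse :: acc).reverse := rfl

lemma splitgo_cons (c : Char) (rest cur : List Char) (acc : List (List Char)) :
    PySem.Chars.split₀.go (c :: rest) cur acc =
      if PySem.Chars.isspace c then
        (if cur.isEmpty then PySem.Chars.split₀.go rest [] acc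
         else PySem.Chars.split₀.go rest [] (cur.reverse :: acc))
      else PySem.Chars.split₀.go rest (c :: cur) acc := rfl

-- split₀.go: the `acc` accumulator is a (reversed) prefix of the result
lemma splitgo_acc_eq : ∀ (s cur : List Char) (acc : List (List Char)),
    PySem.Chars.split₀.go s cur acc = acc.reverse ++ PySem.Chars.split₀.go s cur [] := by
  intro s
  induction s with
  | nil => intro cur acc; by_cases h : cur.isEmpty <;> simp [splitgo_nil, h]
  | cons c rest ih =>
    intro cur acc
    by_cases hs : PySem.Chars.isspace c
    · by_cases hc : cur.isEmpty
      · simp only [splitgo_cons, hs, hc, if_true]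
        exact ih _ _
      · simp only [splitgo_cons, hs, hc, if_true, if_false, Bool.false_eq_true]
        rw [ih [] (cur.reverse :: acc), ih [] [cur.reverse]]
        simp
    · simp only [splitgo_cons, hs, Bool.false_eq_true, if_false]
      exact ih _ _

-- split₀.go consumes a non-space word into its `cur` accumulator
lemma splitgo_word : ∀ (w s cur : List Char) (acc : List (List Char)),
    (∀ c ∈ w, PySem.Chars.isspace c = false) →
    PySem.Chars.split₀.go (w ++ s) cur acc = PySem.Chars.split₀.go s (w.reverse ++ cur) acc := by
  intro w
  induction w with
  | nil => simp
  | cons c t ih =>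
    intro s cur acc h
    have hc : PySem.Chars.isspace c = false := h c (by simp)
    rw [List.cons_append, splitgo_cons, hc]
    simp only [Bool.false_eq_true, if_false]
    rw [ih s (c :: cur) acc (fun x hx => h x (by simp [hx]))]
    simp

lemma split₀_space_cons (c : Char) (s : List Char) (h : PySem.Chars.isspace c = true) :
    PySem.Chars.split₀ (c :: s) = PySem.Chars.split₀ s := by
  simp [PySem.Chars.split₀, splitgo_cons, h]

lemma split₀_word_space (w : List Char) (c : Char) (s : List Char)
    (hw : w ≠ []) (hns : ∀ x ∈ w, PySem.Chars.isspace x = false) (hc : PySem.Chars.isspace c = true) :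
    PySem.Chars.split₀ (w ++ c :: s) = w :: PySem.Chars.split₀ s := by
  unfold PySem.Chars.split₀
  rw [splitgo_word w (c :: s) [] [] hns]
  have hwr : w.reverse.isEmpty = false := by simp [hw]
  simp only [List.append_nil, splitgo_cons, hc, hwr, if_true, Bool.false_eq_true, if_false]
  rw [splitgo_acc_eq s [] [w.reverse.reverse]]
  simp

lemma split₀_word (w : List Char) (hw : w ≠ []) (hns : ∀ x ∈ w, PySem.Chars.isspace x = false) :
    PySem.Chars.split₀ w = [w] := by
  unfold PySem.Chars.split₀
  rw [show w = w ++ [] by simp, splitgo_word w [] [] [] hns]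
  have hwr : w.reverse.isEmpty = false := by simp [hw]
  simp [splitgo_nil, hwr]

lemma strip_of_no_space (cur : List Char) (hns : ∀ c ∈ cur, PySem.Chars.isspace c = false) :
    PySem.Chars.strip cur = cur := by
  have h1 : ∀ (l : List Char), (∀ c ∈ l, PySem.Chars.isspace c = false) →
      List.dropWhile PySem.Chars.isspace l = l := by
    intro l hl
    cases l with
    | nil => rfl
    | cons a t => simp [hl a (by simp)]
  unfold PySem.Chars.strip PySem.Chars.lstrip PySem.Chars.rstrip
  rw [h1 cur hns, h1 cur.reverse (by intro c hc; exact hns c (by simpa using hc)), List.reverse_reverse]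

-- under the invariant "cur is all-alpha", A's flush is just "append cur.upper() if cur nonempty"
lemma flush_alpha (tokens : List String) (cur : List Char)
    (h : ∀ c ∈ cur, PySem.Chars.isalpha c = true) :
    pvFlushA tokens cur =
      if cur.isEmpty then tokens else tokens ++ [String.ofList (PySem.Chars.upper cur)] := by
  have hns : ∀ c ∈ cur, PySem.Chars.isspace c = false := fun c hc => alpha_not_space c (h c hc)
  have hstrip : PySem.Chars.strip cur = cur := strip_of_no_space cur hns
  cases hcur : cur with
  | nil => simp [pvFlushA, PySem.Chars.strip, PySem.Chars.lstrip, PySem.Chars.rstrip]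
  | cons a t =>
    have halpha : PySem.Chars.strIsalpha cur = true := by
      unfold PySem.Chars.strIsalpha
      simp [hcur, List.all_eq_true]
      exact ⟨h a (by simp [hcur]), fun x hx => h x (by simp [hcur, hx])⟩
    rw [← hcur]
    have hne : cur.isEmpty = false := by simp [hcur]
    simp [pvFlushA, hstrip, halpha, hne]

-- the central loop correspondence: finishing A's loop from state (tokens, cur) gives
-- tokens ++ B's tokenization of (cur ++ normalized remainder)
lemma loop_eq (cs : PySem.Set Int) :
    ∀ (ps : List (Int × Char)) (tokens : List String) (cur : List Char),
    (∀ c ∈ cur, PySem.Chars.isalpha c = true) →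
    (pvFlushA (ps.foldl (pvStepA cs) (tokens, cur)).1 (ps.foldl (pvStepA cs) (tokens, cur)).2)
      = tokens ++ (PySem.Chars.split₀ (cur ++ PySem.Chars.join [] (ps.map (pvNormPair cs)))).map
          (fun tok => String.ofList (PySem.Chars.upper tok)) := by
  intro ps
  induction ps with
  | nil =>
    intro tokens cur h
    have hns : ∀ x ∈ cur, PySem.Chars.isspace x = false := fun c hc => alpha_not_space c (h c hc)
    rw [List.foldl_nil, flush_alpha tokens cur h, List.map_nil,
      show PySem.Chars.join [] ([] : List (List Char)) = [] from rfl, List.append_nil]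
    cases hcur : cur with
    | nil => simp [PySem.Chars.split₀, splitgo_nil]
    | cons a t =>
      rw [← hcur]
      have hne : cur.isEmpty = false := by simp [hcur]
      rw [split₀_word cur (by simp [hcur]) hns]
      simp [hne]
  | cons p rest ih =>
    intro tokens cur h
    have hns : ∀ x ∈ cur, PySem.Chars.isspace x = false := fun c hc => alpha_not_space c (h c hc)
    have hsp : PySem.Chars.isspace ' ' = true := by decide
    rw [List.foldl_cons, List.map_cons, join_nil_map_cons]
    by_cases halpha : PySem.Chars.isalpha p.2
    · by_cases hmem : p.1 ∈ cs
      · have hcut : PySem.Set.contains cs p.1 = true := by simp [PySem.Set.contains, hmem]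
        cases hcur : cur with
        | nil =>
          subst hcur
          have hstep : pvStepA cs (tokens, []) p = (tokens, [p.2]) := by
            simp [pvStepA, halpha, hmem]
          rw [hstep, ih tokens [p.2] (by simpa using halpha)]
          simp only [pvNormPair, hcut, halpha, if_true, List.nil_append,
            List.cons_append]
          rw [split₀_space_cons ' ' _ hsp]
        | cons a t =>
          rw [← hcur]
          have hne : cur ≠ [] := by simp [hcur]
          have hflush : pvFlushA tokens cur = tokens ++ [String.ofList (PySem.Chars.upper cur)] := by
            rw [flush_alpha tokens cur h]; simp [hcur]
          have hstep : pvStepA cs (tokens, cur) p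
              = (tokens ++ [String.ofList (PySem.Chars.upper cur)], [p.2]) := by
            simp [pvStepA, halpha, hmem, hne, hflush]
          rw [hstep, ih _ [p.2] (by simpa using halpha)]
          simp only [pvNormPair, hcut, halpha, if_true, List.append_assoc,
            List.cons_append]
          rw [split₀_word_space cur ' ' _ hne hns hsp]
          simp
      · have hcut : PySem.Set.contains cs p.1 = false := by simp [PySem.Set.contains, hmem]
        have hstep : pvStepA cs (tokens, cur) p = (tokens, cur ++ [p.2]) := by
          simp [pvStepA, halpha, hmem]
        rw [hstep, ih tokens (cur ++ [p.2])
          (by intro c hc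
              rcases List.mem_append.mp hc with hc | hc
              · exact h c hc
              · simp at hc; subst hc; exact halpha)]
        simp only [pvNormPair, hcut, halpha, if_true, if_false, Bool.false_eq_true,
          List.nil_append, List.append_assoc, List.cons_append]
    · by_cases hmem : p.1 ∈ cs
      · have hcut : PySem.Set.contains cs p.1 = true := by simp [PySem.Set.contains, hmem]
        cases hcur : cur with
        | nil =>
          subst hcur
          have hstep : pvStepA cs (tokens, []) p = (tokens, []) := by
            simp [pvStepA, halpha, hmem]
          rw [hstep, ih tokens [] (by simp)]
          simp only [pvNormPair, hcut, halpha, if_true, if_false, Bool.false_eq_true,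
            List.nil_append, List.cons_append]
          rw [split₀_space_cons ' ' _ hsp, split₀_space_cons ' ' _ hsp]
        | cons a t =>
          rw [← hcur]
          have hne : cur ≠ [] := by simp [hcur]
          have hflush : pvFlushA tokens cur = tokens ++ [String.ofList (PySem.Chars.upper cur)] := by
            rw [flush_alpha tokens cur h]; simp [hcur]
          have hstep : pvStepA cs (tokens, cur) p
              = (tokens ++ [String.ofList (PySem.Chars.upper cur)], []) := by
            simp [pvStepA, halpha, hmem, hne, hflush]
          rw [hstep, ih _ [] (by simp)]
          simp only [pvNormPair, hcut, halpha, if_true, if_false, Bool.false_eq_true,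
            List.nil_append, List.append_assoc, List.cons_append]
          rw [split₀_word_space cur ' ' _ hne hns hsp, split₀_space_cons ' ' _ hsp]
          simp
      · have hcut : PySem.Set.contains cs p.1 = false := by simp [PySem.Set.contains, hmem]
        cases hcur : cur with
        | nil =>
          subst hcur
          have hstep : pvStepA cs (tokens, []) p = (tokens, []) := by
            simp [pvStepA, halpha, hmem]
          rw [hstep, ih tokens [] (by simp)]
          simp only [pvNormPair, hcut, halpha, if_false, Bool.false_eq_true,
            List.nil_append, List.cons_append]
          rw [split₀_space_cons ' ' _ hsp]
        | cons a t =>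
          rw [← hcur]
          have hne : cur ≠ [] := by simp [hcur]
          have hflush : pvFlushA tokens cur = tokens ++ [String.ofList (PySem.Chars.upper cur)] := by
            rw [flush_alpha tokens cur h]; simp [hcur]
          have hstep : pvStepA cs (tokens, cur) p
              = (tokens ++ [String.ofList (PySem.Chars.upper cur)], []) := by
            simp [pvStepA, halpha, hmem, hne, hflush]
          rw [hstep, ih _ [] (by simp)]
          simp only [pvNormPair, hcut, halpha, if_false, Bool.false_eq_true,
            List.nil_append, List.append_assoc, List.cons_append]
          rw [split₀_word_space cur ' ' _ hne hns hsp]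
          simp

-- ===== VERDICT (by name: the statement is the Claim_ definition above) =====
theorem tokenize_v2_spec : Claim_equal_tokenize_v2 := by
  intro text canonical_cuts head_end _
  unfold Spec_tokenize_v2 tokenize_v2 tokenize_v2_alt
  have := loop_eq (PySem.Set.ofList canonical_cuts)
    (PySem.List.enumerate (pvHead text head_end) 0) [] [] (by simp)
  simpa using this
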